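-- pv_equiv track=rewrite | github.com/kaminglui/Karin | bridge/tools/_regions.py | resolve_year
-- ===== SOURCE A (Python) =====
-- def resolve_year(requested: int | None, available: list[int]) -> int | None:
--     """Pick a year from ``available`` to honor ``requested``.
--
--     Policy: exact match if present, else the closest year ≤ requested,
--     else the latest available year. Returns ``None`` only when the
--     available list is empty.
--
--     Used by `inflation`, `population`, `facts`, `alice`, and
--     `county_metrics` so a user prompt like "wages in 2017" gracefully
--     degrades to 2016 when 2017 isn't in the dataset, rather than
--     raising or returning the latest year out of the blue.
--     """
--     if not available:
--         return None
--     if requested is None: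
--         return max(available)
--     if requested in available:
--         return requested
--     older = [y for y in available if y <= requested]
--     return max(older) if older else max(available)
-- ===== SOURCE B (Python) =====
-- def resolve_year(requested: int | None, available: list[int]) -> int | None:
--     """Sort-based version: in descending order, the first year <= requested is
--     the answer (exact match included); if none qualifies (or no request),
--     the head of the sorted list is the latest year."""
--     if not available:
--         return None
--     years = sorted(available, reverse=True)
--     if requested is None:
--         return years[0]
--     for y in years:
--         if y <= requested:
--             return y
--     return years[0]
-- ===== Notes on version B (the rewrite author's own statement) =====
-- stated objective: alternative
-- what changed: B sorts the list in descending order once and returns the first element <= requested (exact matches fall out automatically), falling back to the sorted head (the latest year); A's membership test, filter comprehension and max() scans disappear.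
import Mathlib
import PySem

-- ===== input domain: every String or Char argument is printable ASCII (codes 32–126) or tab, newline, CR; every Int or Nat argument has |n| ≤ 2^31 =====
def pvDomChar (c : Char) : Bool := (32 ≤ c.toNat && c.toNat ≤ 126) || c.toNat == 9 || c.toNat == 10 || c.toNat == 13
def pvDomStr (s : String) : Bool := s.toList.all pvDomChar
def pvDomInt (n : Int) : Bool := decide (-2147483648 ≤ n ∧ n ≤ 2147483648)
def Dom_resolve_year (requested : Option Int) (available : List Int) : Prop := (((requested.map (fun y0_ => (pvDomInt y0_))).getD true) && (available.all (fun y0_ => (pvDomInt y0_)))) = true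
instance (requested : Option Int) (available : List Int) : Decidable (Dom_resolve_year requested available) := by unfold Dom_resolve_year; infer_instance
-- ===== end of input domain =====

-- B sorts the list descending once and returns the first element ≤ requested (else the head = latest); A's membership test, filter and max() scans are gone (objective: alternative).

-- ===== PORT A =====
def resolve_year (requested : Option Int) (available : List Int) : Option Int :=
  if available = [] then none
  else
    match requested with
    | none => PySem.List.max? available (fun y => y)
    | some r =>
      if available.contains r then some r
      else
        let older := available.filter (fun y => decide (y ≤ r))
        if older ≠ [] then PySem.List.max? older (fun y => y)
        else PySem.List.max? available (fun y => y)

-- ===== PORT B =====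
def resolve_year_alt (requested : Option Int) (available : List Int) : Option Int :=
  if available = [] then none
  else
    let years := PySem.List.sorted available (fun y => y) true
    match requested with
    | none => years.head?
    | some r =>
      match years.find? (fun y => decide (y ≤ r)) with
      | some y => some y
      | none => years.head?

-- ===== PRECONDITION & SPEC =====
def Spec_resolve_year (requested : Option Int) (available : List Int) (out : Option Int) : Prop := out = resolve_year_alt requested available
instance (requested : Option Int) (available : List Int) (out : Option Int) : Decidable (Spec_resolve_year requested available out) := by unfold Spec_resolve_year; infer_instance

-- ===== CLAIM =====
def Claim_equal_resolve_year : Prop := ∀ (requested : Option Int) (available : List Int), Dom_resolve_year requested available → Spec_resolve_year requested available (resolve_year requested available)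

-- ===== LEMMAS AND PROOFS =====

-- on a descending list, find? (· ≤ r) returns an element ≤ r that dominates every element ≤ r
theorem find_desc {r : Int} : ∀ {ys : List Int}, ys.Pairwise (fun a b => b ≤ a) →
    ∀ {m : Int}, ys.find? (fun y => decide (y ≤ r)) = some m →
    m ∈ ys ∧ m ≤ r ∧ ∀ y ∈ ys, y ≤ r → y ≤ m := by
  intro ys
  induction ys with
  | nil => intro _ m h; simp [List.find?] at h
  | cons x t ih =>
    intro hp m h
    have hp' := (List.pairwise_cons.mp hp)
    by_cases hx : x ≤ r
    · simp [List.find?, hx] at h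
      subst h
      exact ⟨List.mem_cons_self, hx, by
        intro y hy _
        rcases List.mem_cons.mp hy with h | h
        · omega
        · exact hp'.1 y h⟩
    · simp [List.find?, hx] at h
      obtain ⟨hm, hmr, hdom⟩ := ih hp'.2 h
      exact ⟨List.mem_cons_of_mem _ hm, hmr, by
        intro y hy hyr
        rcases List.mem_cons.mp hy with h | h
        · omega
        · exact hdom y h hyr⟩

-- the head of the descending sort of a nonempty list equals max? of the list
theorem head_sorted_rev_eq_max (available : List Int) (h : available ≠ []) :
    (PySem.List.sorted available (fun y => y) true).head? =
    PySem.List.max? available (fun y => y) := by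
  rcases hs : PySem.List.sorted available (fun y => y) true with _ | ⟨m, u⟩
  · exact absurd ((PySem.List.sorted_eq_nil_iff available (fun y => y) true).mp hs) h
  rcases hM : PySem.List.max? available (fun y => y) with _ | M
  · exact absurd ((PySem.List.max?_eq_none_iff available (fun y => y)).mp hM) h
  have hmax := PySem.List.max?_isMax hM
  have hMmem := PySem.List.max?_mem hM
  have hge := PySem.List.key_head_sorted_rev_ge available (fun y => y) hs
  have hmmem : m ∈ available := by
    have : m ∈ PySem.List.sorted available (fun y => y) true := by rw [hs]; simp
    exact (PySem.List.mem_sorted available (fun y => y) true m).mp this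
  have h1 : m ≤ M := hmax m hmmem
  have h2 : M ≤ m := hge M hMmem
  simp only [List.head?, Option.some.injEq]
  omega

-- ===== VERDICT =====
theorem resolve_year_spec : Claim_equal_resolve_year := by
  intro requested available _
  unfold Spec_resolve_year resolve_year resolve_year_alt
  by_cases hnil : available = []
  · simp [hnil]
  rw [if_neg hnil, if_neg hnil]
  cases requested with
  | none => exact (head_sorted_rev_eq_max available hnil).symm
  | some r =>
    have hperm : (PySem.List.sorted available (fun y => y) true).Perm available :=
      PySem.List.sorted_perm available (fun y => y) true
    have hpair : (PySem.List.sorted available (fun y => y) true).Pairwise (fun a b => b ≤ a) := by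
      simpa using PySem.List.sorted_pairwise_rev available (fun y => y)
    rcases hf : (PySem.List.sorted available (fun y => y) true).find? (fun y => decide (y ≤ r)) with _ | m
    · -- no element ≤ r at all
      simp only [hf]
      have hnone : ∀ y ∈ available, ¬ (y ≤ r) := by
        intro y hy
        have hy' : y ∈ PySem.List.sorted available (fun y => y) true := hperm.mem_iff.mpr hy
        have := List.find?_eq_none.mp hf y hy'
        simpa using this
      have hc : ¬ (available.contains r = true) := by
        intro hc
        exact hnone r (List.contains_iff_mem.mp hc) le_rfl
      have hfil : available.filter (fun y => decide (y ≤ r)) = [] := by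
        rw [List.filter_eq_nil_iff]
        intro y hy; simpa using hnone y hy
      rw [if_neg hc, if_neg (by simpa using hfil)]
      exact (head_sorted_rev_eq_max available hnil).symm
    · simp only [hf]
      obtain ⟨hm, hmr, hdom⟩ := find_desc hpair hf
      have hmav : m ∈ available := hperm.mem_iff.mp hm
      have hdomav : ∀ y ∈ available, y ≤ r → y ≤ m := by
        intro y hy; exact hdom y (hperm.mem_iff.mpr hy)
      by_cases hc : available.contains r = true
      · -- exact match: the found element is r itself
        have hr : r ∈ available := List.contains_iff_mem.mp hc
        have h1 : r ≤ m := hdomav r hr le_rfl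
        rw [if_pos hc]
        have : m = r := by omega
        rw [this]
      · have hfil : available.filter (fun y => decide (y ≤ r)) ≠ [] := by
          intro h
          have := List.filter_eq_nil_iff.mp h m hmav
          simp [hmr] at this
        rcases hM : PySem.List.max? (available.filter (fun y => decide (y ≤ r))) (fun y => y) with _ | M
        · exact absurd ((PySem.List.max?_eq_none_iff _ _).mp hM) hfil
        have hMmem := PySem.List.max?_mem hM
        have hmax := PySem.List.max?_isMax hM
        have hMfil := List.mem_filter.mp hMmem
        have h1 : M ≤ m := hdomav M hMfil.1 (by simpa using hMfil.2)
        have h2 : m ≤ M := hmax m (List.mem_filter.mpr ⟨hmav, by simpa using hmr⟩)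
        rw [if_neg hc, if_pos hfil]
        exact congrArg some (by omega)
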